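-- pv_equiv track=rewrite | github.com/je0ngyun/coding-test | Exam/L/4.py | solution
-- ===== SOURCE A (Python) =====
-- import math
--
-- def list_chunk(n):
--     return [[] for i in range(n)]
--
-- def is_prime_number(x):
--     if x == 1:
--         return False
--     for i in range(2, int(math.sqrt(x)) + 1):
--         if x % i == 0:
--             return False
--     return True
--
-- def solution(list):
--     if len(list) == 1:
--         return list
--
--     # p찾기
--     p = 0
--     for i in range(2, len(list) + 1):
--         if is_prime_number(i) and len(list) % i == 0:
--             p = i
--             break
--
--     # p로 배열을 분할
--     chunked = list_chunk(p)
--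
--     # p에따라 숫자를 나눠넣기
--     point = 0
--     for item in list:
--         if point >= p:
--             point = 0
--         chunked[point].append(item)
--         point += 1
--
--     # 배열 붙혀서 리턴
--     ret = []
--     for item in chunked:
--         ret += solution(item)
--
--     return ret
-- ===== SOURCE B (Python) =====
-- def solution(list):
--     n = len(list)
--     if n <= 1:
--         return list
--     # ascending prime factorization of n by trial division
--     primes = []
--     m, d = n, 2
--     while d * d <= m:
--         if m % d == 0:
--             primes.append(d)
--             m //= d
--         else:
--             d += 1
--     if m > 1:
--         primes.append(m)
--     # place each element directly at its final destination (mixed-radix digits)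
--     result = list.copy()
--     for i in range(n):
--         rem, dest, size = i, 0, n
--         for p in primes:
--             size //= p
--             dest += (rem % p) * size
--             rem //= p
--         result[dest] = list[i]
--     return result
-- ===== Notes on version B (the rewrite author's own statement) =====
-- stated objective: alternative
-- what changed: replaces A's recursive round-robin partition-and-concatenate (re-finding the smallest prime factor at every recursion level) with a single non-recursive pass: factorize len(list) once into ascending primes and place each element directly at its final position computed from the mixed-radix digits of its index
import Mathlib
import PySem

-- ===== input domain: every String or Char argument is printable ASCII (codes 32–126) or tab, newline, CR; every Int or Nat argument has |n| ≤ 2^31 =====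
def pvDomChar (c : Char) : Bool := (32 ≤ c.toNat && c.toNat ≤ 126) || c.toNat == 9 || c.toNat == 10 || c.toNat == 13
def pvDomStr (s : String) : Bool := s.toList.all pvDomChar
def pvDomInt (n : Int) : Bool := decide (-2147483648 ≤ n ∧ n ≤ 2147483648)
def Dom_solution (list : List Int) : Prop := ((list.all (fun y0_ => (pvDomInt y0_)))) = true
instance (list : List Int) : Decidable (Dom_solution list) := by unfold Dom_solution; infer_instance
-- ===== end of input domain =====

-- B reorders the list by computing each element's final destination in one pass (mixed-radix
-- digits of its index over the ascending prime factorization of the length) instead of A's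
-- recursive round-robin partitioning; alternative algorithm, same exact return value.

-- ===== PORT A =====

-- is_prime_number(x): trial division over range(2, int(math.sqrt(x))+1)
-- (int(math.sqrt(x)) = Nat.sqrt x, exact for the integer sizes reachable here)
def isPrimeNumber (x : Nat) : Bool :=
  if x = 1 then false
  else (List.range' 2 (Nat.sqrt x + 1 - 2)).all (fun i => x % i != 0)

-- the `for i in range(2, len(list)+1): if …: p = i; break` search (p stays 0 if no hit)
def findPAux (n : Nat) (i : Nat) : Nat :=
  if _h : i ≤ n then
    if isPrimeNumber i && n % i == 0 then i else findPAux n (i + 1)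
  else 0
termination_by n + 1 - i

def findP (n : Nat) : Nat := findPAux n 2

-- the `for item in list: if point >= p: point = 0; chunked[point].append(item); point += 1`
-- loop (chunked[point].append(item) = in-place update of slot point)
def chunkLoop (items : List Int) (chunked : List (List Int)) (point p : Nat) :
    List (List Int) :=
  match items with
  | [] => chunked
  | x :: rest =>
    let point' := if point ≥ p then 0 else point
    chunkLoop rest (chunked.set point' (chunked.getD point' [] ++ [x])) (point' + 1) p

-- fuel only guards totality of the recursion (recursion depth ≤ length, so fuel = length
-- suffices; for the empty list A also returns [])
def solutionFuel : Nat → List Int → List Int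
  | 0, _ => []
  | fuel + 1, list =>
    if list.length = 1 then list
    else
      let p := findP list.length
      let chunked := chunkLoop list (List.replicate p []) 0 p
      chunked.foldl (fun ret c => ret ++ solutionFuel fuel c) []

def solution (list : List Int) : List Int := solutionFuel list.length list

-- ===== PORT B =====

-- the `while d*d <= m: …` trial-division factorization plus the final `if m > 1` append;
-- fuel only guards totality of the while loop (n iterations suffice)
def factAux : Nat → Nat → Nat → List Nat
  | 0, _, _ => []
  | fuel + 1, m, d =>
    if d * d ≤ m then
      if m % d = 0 then d :: factAux fuel (m / d) d
      else factAux fuel m (d + 1)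
    else if 1 < m then [m] else []

-- the `for p in primes: size //= p; dest += (rem % p) * size; rem //= p` loop
def destLoop : List Nat → Nat → Nat → Nat → Nat
  | [], _, _, dest => dest
  | p :: t, size, rem, dest => destLoop t (size / p) (rem / p) (dest + rem % p * (size / p))

def solution_alt (list : List Int) : List Int :=
  let n := list.length
  if n ≤ 1 then list
  else
    let primes := factAux n n 2
    -- result = list.copy(); result[dest] = list[i]  (dest < n and i < n always hold)
    (List.range n).foldl (fun res i => res.set (destLoop primes n i 0) (list.getD i 0)) list

-- ===== PRECONDITION & SPEC =====

def Spec_solution (list : List Int) (out : List Int) : Prop := out = solution_alt list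
instance (list : List Int) (out : List Int) : Decidable (Spec_solution list out) := by
  unfold Spec_solution; infer_instance

-- ===== CLAIM (what is proved, stated in full; the proofs are below) =====
def Claim_equal_solution : Prop := ∀ (list : List Int), Dom_solution list → Spec_solution list (solution list)

-- ===== LEMMAS AND PROOFS =====

-- pure (accumulator-free) version of destLoop
def destF : List Nat → Nat → Nat → Nat
  | [], _, _ => 0
  | p :: t, size, rem => rem % p * (size / p) + destF t (size / p) (rem / p)

-- round-robin distribution: chunk j produced by chunkLoop (s = running pointer)
def dist (p s : Nat) (l : List Int) (j : Nat) : List Int :=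
  match l with
  | [] => []
  | x :: xs => (if s % p = j then [x] else []) ++ dist p (s % p + 1) xs j

theorem dist_nil (p s j : Nat) : dist p s [] j = [] := rfl

theorem dist_cons (p s j : Nat) (x : Int) (xs : List Int) :
    dist p s (x :: xs) j = (if s % p = j then [x] else []) ++ dist p (s % p + 1) xs j := rfl

theorem destLoop_eq (t : List Nat) (size rem dest : Nat) :
    destLoop t size rem dest = dest + destF t size rem := by
  induction t generalizing size rem dest with
  | nil => simp [destLoop, destF]
  | cons p t ih => simp [destLoop, destF, ih]; ring

theorem pfl_cons (n : Nat) (h : 2 ≤ n) :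
    n.primeFactorsList = n.minFac :: (n / n.minFac).primeFactorsList := by
  obtain ⟨k, rfl⟩ : ∃ k, n = k + 2 := ⟨n - 2, by omega⟩
  rw [Nat.primeFactorsList]

theorem mod_eq_zero_of_dvd {a b : Nat} (h : a ∣ b) : b % a = 0 := by
  obtain ⟨c, rfl⟩ := h
  exact Nat.mul_mod_right a c

theorem factAux_eq (fuel : Nat) : ∀ (m d : Nat), 2 ≤ d → m + 2 - d ≤ fuel →
    (∀ q, Nat.Prime q → q ∣ m → d ≤ q) → factAux fuel m d = m.primeFactorsList := by
  induction fuel with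
  | zero =>
    intro m d hd hfuel hmin
    have hm : m ≤ 1 := by
      rcases Nat.lt_or_ge 1 m with h | h
      · exfalso
        obtain ⟨q, hq, hqd⟩ := Nat.exists_prime_and_dvd (show m ≠ 1 by omega)
        have h1 := hmin q hq hqd
        have h2 := Nat.le_of_dvd (by omega) hqd
        omega
      · exact h
    interval_cases m <;> simp [factAux]
  | succ fuel ih =>
    intro m d hd hfuel hmin
    show (if d * d ≤ m then
        if m % d = 0 then d :: factAux fuel (m / d) d
        else factAux fuel m (d + 1)
      else if 1 < m then [m] else []) = m.primeFactorsList
    by_cases hdm : d * d ≤ m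
    · rw [if_pos hdm]
      have hm4 : 4 ≤ m := by nlinarith
      by_cases hmd : m % d = 0
      · rw [if_pos hmd]
        have hdvd : d ∣ m := Nat.dvd_of_mod_eq_zero hmd
        have hdmin : d = m.minFac := by
          have h1 : m.minFac ≤ d := Nat.minFac_le_of_dvd hd hdvd
          have h2 : d ≤ m.minFac := hmin _ (Nat.minFac_prime (by omega)) (Nat.minFac_dvd m)
          omega
        rw [pfl_cons m (by omega), ← hdmin]
        congr 1
        have hlt : m / d < m := Nat.div_lt_self (by omega) (by omega)
        exact ih (m / d) d hd (by omega)
          (fun q hq hqd => hmin q hq (hqd.trans (Nat.div_dvd_of_dvd hdvd)))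
      · rw [if_neg hmd]
        refine ih m (d + 1) (by omega) (by omega) ?_
        intro q hq hqd
        have h1 := hmin q hq hqd
        rcases Nat.lt_or_ge d q with h | h
        · omega
        · have hqe : q = d := by omega
          subst hqe
          exact absurd (mod_eq_zero_of_dvd hqd) hmd
    · rw [if_neg hdm]
      by_cases h1 : 1 < m
      · rw [if_pos h1]
        have hprime : m.Prime := by
          by_contra hnp
          have hsq := Nat.minFac_sq_le_self (by omega) hnp
          have h2 := hmin _ (Nat.minFac_prime (by omega)) (Nat.minFac_dvd m)
          have h3 : d * d ≤ m.minFac * m.minFac := Nat.mul_le_mul h2 h2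
          have h4 : m.minFac * m.minFac = m.minFac ^ 2 := by ring
          omega
        rw [Nat.primeFactorsList_prime hprime]
      · rw [if_neg h1]
        have hm01 : m = 0 ∨ m = 1 := by omega
        rcases hm01 with h | h <;> subst h <;> simp

theorem fact_eq (n : Nat) : factAux n n 2 = n.primeFactorsList :=
  factAux_eq n n 2 (by omega) (by omega) (fun q hq _ => hq.two_le)

theorem isPrime_of_prime (q : Nat) (hq : Nat.Prime q) : isPrimeNumber q = true := by
  unfold isPrimeNumber
  rw [if_neg hq.ne_one]
  rw [List.all_eq_true]
  intro i hi
  rw [List.mem_range'_1] at hi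
  have h2 : 2 ≤ i := hi.1
  have hsq : i ≤ Nat.sqrt q := by omega
  have hnd : ¬ i ∣ q := (Nat.prime_def_le_sqrt.mp hq).2 i h2 hsq
  simp only [bne_iff_ne, ne_eq]
  intro hmod
  exact hnd (Nat.dvd_of_mod_eq_zero hmod)

theorem findPAux_eq (n : Nat) (hn : 2 ≤ n) :
    ∀ (k i : Nat), 2 ≤ i → i ≤ n.minFac → n.minFac - i ≤ k → findPAux n i = n.minFac := by
  have hp : (n.minFac).Prime := Nat.minFac_prime (by omega)
  have hmfn : n.minFac ≤ n := Nat.minFac_le (by omega)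
  have hhit : findPAux n n.minFac = n.minFac := by
    rw [findPAux, dif_pos (by omega)]
    have hprime := isPrime_of_prime _ hp
    have hmod : n % n.minFac = 0 := mod_eq_zero_of_dvd (Nat.minFac_dvd n)
    rw [if_pos (by simp [hprime, hmod])]
  intro k
  induction k with
  | zero =>
    intro i h2 hle hk
    have hie : i = n.minFac := by omega
    rw [hie]
    exact hhit
  | succ k ih =>
    intro i h2 hle hk
    rcases Nat.eq_or_lt_of_le hle with he | hlt
    · rw [he]
      exact hhit
    · rw [findPAux, dif_pos (by omega)]
      have hndvd : n % i ≠ 0 := by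
        intro h
        have := Nat.minFac_le_of_dvd h2 (Nat.dvd_of_mod_eq_zero h)
        omega
      rw [if_neg (by simp [hndvd])]
      exact ih (i + 1) (by omega) (by omega) (by omega)

theorem findP_eq (n : Nat) (hn : 2 ≤ n) : findP n = n.minFac := by
  have h2 : 2 ≤ n.minFac := (Nat.minFac_prime (by omega)).two_le
  exact findPAux_eq n hn n.minFac 2 (by omega) h2 (by omega)

theorem mul_add_lt (a b p m : Nat) (ha : a < p) (hb : b < m) : a * m + b < p * m := by
  calc a * m + b < a * m + m := by omega
    _ = (a + 1) * m := by ring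
    _ ≤ p * m := Nat.mul_le_mul_right m (by omega)

theorem destF_lt (ps : List Nat) : ∀ (n i : Nat), ps.prod = n →
    (∀ p ∈ ps, 0 < p) → i < n → destF ps n i < n := by
  induction ps with
  | nil =>
    intro n i hp hpos hi
    simp at hp
    subst hp
    simpa [destF] using hi
  | cons p t ih =>
    intro n i hp hpos hi
    have hp0 : 0 < p := hpos p (by simp)
    have hprod : p * t.prod = n := by simpa using hp
    have hm0 : 0 < t.prod := by
      rcases Nat.eq_zero_or_pos t.prod with h | h
      · rw [h, Nat.mul_zero] at hprod; omega
      · exact h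
    have hnp : n / p = t.prod := by
      rw [← hprod, Nat.mul_div_cancel_left _ hp0]
    show i % p * (n / p) + destF t (n / p) (i / p) < n
    rw [hnp]
    have hdv : i / p < t.prod := by
      rw [Nat.div_lt_iff_lt_mul hp0, Nat.mul_comm t.prod p, hprod]
      exact hi
    have h1 := ih t.prod (i / p) rfl (fun q hq => hpos q (by simp [hq])) hdv
    have h2 : i % p < p := Nat.mod_lt _ hp0
    calc i % p * t.prod + destF t t.prod (i / p) < p * t.prod := mul_add_lt _ _ _ _ h2 h1
      _ = n := hprod

theorem destF_inj (ps : List Nat) : ∀ (n i₁ i₂ : Nat), ps.prod = n →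
    (∀ p ∈ ps, 0 < p) → i₁ < n → i₂ < n →
    destF ps n i₁ = destF ps n i₂ → i₁ = i₂ := by
  induction ps with
  | nil =>
    intro n i₁ i₂ hp hpos h1 h2 he
    simp at hp
    omega
  | cons p t ih =>
    intro n i₁ i₂ hp hpos h1 h2 he
    have hp0 : 0 < p := hpos p (by simp)
    have hprod : p * t.prod = n := by simpa using hp
    have hm0 : 0 < t.prod := by
      rcases Nat.eq_zero_or_pos t.prod with h | h
      · rw [h, Nat.mul_zero] at hprod; omega
      · exact h
    have hnp : n / p = t.prod := by rw [← hprod, Nat.mul_div_cancel_left _ hp0]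
    have hd1 : i₁ / p < t.prod := by
      rw [Nat.div_lt_iff_lt_mul hp0, Nat.mul_comm t.prod p, hprod]; exact h1
    have hd2 : i₂ / p < t.prod := by
      rw [Nat.div_lt_iff_lt_mul hp0, Nat.mul_comm t.prod p, hprod]; exact h2
    have hr1 := destF_lt t t.prod (i₁ / p) rfl (fun q hq => hpos q (by simp [hq])) hd1
    have hr2 := destF_lt t t.prod (i₂ / p) rfl (fun q hq => hpos q (by simp [hq])) hd2
    have he' : i₁ % p * t.prod + destF t t.prod (i₁ / p)
        = i₂ % p * t.prod + destF t t.prod (i₂ / p) := by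
      simpa [destF, hnp] using he
    have hq : i₁ % p = i₂ % p := by
      have e1 : (i₁ % p * t.prod + destF t t.prod (i₁ / p)) / t.prod = i₁ % p := by
        rw [Nat.mul_comm (i₁ % p), Nat.mul_add_div hm0, Nat.div_eq_of_lt hr1, Nat.add_zero]
      have e2 : (i₂ % p * t.prod + destF t t.prod (i₂ / p)) / t.prod = i₂ % p := by
        rw [Nat.mul_comm (i₂ % p), Nat.mul_add_div hm0, Nat.div_eq_of_lt hr2, Nat.add_zero]
      rw [← e1, ← e2, he']
    have hrest : destF t t.prod (i₁ / p) = destF t t.prod (i₂ / p) := by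
      have he'' := he'
      rw [hq] at he''
      omega
    have hdiv : i₁ / p = i₂ / p :=
      ih t.prod (i₁ / p) (i₂ / p) rfl (fun q hq => hpos q (by simp [hq])) hd1 hd2 hrest
    have m1 := Nat.div_add_mod i₁ p
    have m2 := Nat.div_add_mod i₂ p
    rw [hdiv] at m1
    omega

theorem destF_surj (ps : List Nat) : ∀ (n d : Nat), ps.prod = n →
    (∀ p ∈ ps, 0 < p) → d < n → ∃ i, i < n ∧ destF ps n i = d := by
  induction ps with
  | nil =>
    intro n d hp hpos hd
    simp at hp
    exact ⟨0, by omega, by simp [destF]; omega⟩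
  | cons p t ih =>
    intro n d hp hpos hd
    have hp0 : 0 < p := hpos p (by simp)
    have hprod : p * t.prod = n := by simpa using hp
    have hm0 : 0 < t.prod := by
      rcases Nat.eq_zero_or_pos t.prod with h | h
      · rw [h, Nat.mul_zero] at hprod; omega
      · exact h
    have hnp : n / p = t.prod := by rw [← hprod, Nat.mul_div_cancel_left _ hp0]
    have hj : d / t.prod < p := by
      rw [Nat.div_lt_iff_lt_mul hm0]
      omega
    have hr : d % t.prod < t.prod := Nat.mod_lt _ hm0
    obtain ⟨it, hit, hdt⟩ := ih t.prod (d % t.prod) rfl (fun q hq => hpos q (by simp [hq])) hr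
    refine ⟨d / t.prod + p * it, ?_, ?_⟩
    · have hb := mul_add_lt it (d / t.prod) t.prod p hit hj
      have e1 : it * p = p * it := Nat.mul_comm _ _
      have e2 : t.prod * p = p * t.prod := Nat.mul_comm _ _
      omega
    · show (d / t.prod + p * it) % p * (n / p) + destF t (n / p) ((d / t.prod + p * it) / p) = d
      have e1 : (d / t.prod + p * it) % p = d / t.prod := by
        rw [Nat.add_mul_mod_self_left, Nat.mod_eq_of_lt hj]
      have e2 : (d / t.prod + p * it) / p = it := by
        rw [Nat.add_mul_div_left _ _ hp0, Nat.div_eq_of_lt hj]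
        omega
      rw [e1, e2, hnp, hdt]
      have e3 := Nat.div_add_mod d t.prod
      have e4 : d / t.prod * t.prod = t.prod * (d / t.prod) := Nat.mul_comm _ _
      omega

-- foldl-set machinery
theorem length_foldl_set (f : Nat → Nat) (g : Nat → Int) (l : List Nat) (acc : List Int) :
    (l.foldl (fun a i => a.set (f i) (g i)) acc).length = acc.length := by
  induction l generalizing acc with
  | nil => rfl
  | cons x xs ih => simp [List.foldl, ih]

theorem getElem?_foldl_set_untouched (f : Nat → Nat) (g : Nat → Int) (l : List Nat)
    (acc : List Int) (d : Nat) (h : ∀ i ∈ l, f i ≠ d) :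
    (l.foldl (fun a i => a.set (f i) (g i)) acc)[d]? = acc[d]? := by
  induction l generalizing acc with
  | nil => rfl
  | cons x xs ih =>
    simp only [List.foldl]
    rw [ih _ (fun i hi => h i (List.mem_cons_of_mem _ hi))]
    exact List.getElem?_set_ne (h x List.mem_cons_self)

theorem getElem?_foldl_set_hit (f : Nat → Nat) (g : Nat → Int) (l : List Nat)
    (acc : List Int) (i₀ : Nat) (hmem : i₀ ∈ l)
    (hinj : ∀ j ∈ l, f j = f i₀ → j = i₀) (hlt : f i₀ < acc.length) :
    (l.foldl (fun a i => a.set (f i) (g i)) acc)[f i₀]? = some (g i₀) := by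
  induction l generalizing acc with
  | nil => cases hmem
  | cons x xs ih =>
    simp only [List.foldl]
    by_cases hx : i₀ ∈ xs
    · exact ih _ hx (fun j hj => hinj j (List.mem_cons_of_mem _ hj)) (by simpa using hlt)
    · have hxi : x = i₀ := by
        rcases List.mem_cons.1 hmem with h | h
        · exact h.symm
        · exact absurd h hx
      subst hxi
      rw [getElem?_foldl_set_untouched _ _ _ _ _
        (fun j hj hfj => absurd (hinj j (List.mem_cons_of_mem _ hj) hfj ▸ hj) hx)]
      exact List.getElem?_set_self (by simpa using hlt)

-- characterization of B's output
theorem solution_alt_short (l : List Int) (h : l.length ≤ 1) : solution_alt l = l := by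
  simp only [solution_alt]
  rw [if_pos h]

theorem solution_alt_length (l : List Int) : (solution_alt l).length = l.length := by
  by_cases h : l.length ≤ 1
  · rw [solution_alt_short l h]
  · simp only [solution_alt]
    rw [if_neg h]
    exact length_foldl_set _ _ _ _

theorem solution_alt_getElem? (l : List Int) (hn : 2 ≤ l.length) (i : Nat)
    (hi : i < l.length) :
    (solution_alt l)[destF l.length.primeFactorsList l.length i]? = some (l.getD i 0) := by
  have hn0 : l.length ≠ 0 := by omega
  have hprod : (l.length.primeFactorsList).prod = l.length := Nat.prod_primeFactorsList hn0
  have hpos : ∀ p ∈ l.length.primeFactorsList, 0 < p :=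
    fun p hp => Nat.pos_of_mem_primeFactorsList hp
  have hne : ¬ l.length ≤ 1 := by omega
  simp only [solution_alt]
  rw [if_neg hne]
  show (List.foldl (fun res i => res.set (destLoop (factAux l.length l.length 2)
      l.length i 0) (l.getD i 0)) l (List.range l.length))[_]? = _
  rw [fact_eq]
  simp only [destLoop_eq, Nat.zero_add]
  exact getElem?_foldl_set_hit (fun i => destF l.length.primeFactorsList l.length i)
    (fun i => l.getD i 0) (List.range l.length) l i (List.mem_range.mpr hi)
    (fun j hj he => destF_inj _ _ _ _ hprod hpos (List.mem_range.mp hj) hi he)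
    (destF_lt _ _ _ hprod hpos hi)

-- chunkLoop produces exactly the dist chunks
theorem dist_mod (p s : Nat) (l : List Int) (j : Nat) : dist p (s % p) l j = dist p s l j := by
  cases l with
  | nil => rfl
  | cons x xs =>
    rw [dist_cons, dist_cons, Nat.mod_mod_of_dvd _ (dvd_refl p)]

theorem getD_map_range (L : List (List Int)) :
    (List.range L.length).map (fun j => L.getD j []) = L := by
  apply List.ext_getElem
  · simp
  · intro k h1 h2
    simp only [List.getElem_map, List.getElem_range]
    rw [List.getD_eq_getElem _ _ h2]

theorem getD_set_self (L : List (List Int)) (i : Nat) (v : List Int) (h : i < L.length) :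
    (L.set i v).getD i [] = v := by
  rw [List.getD_eq_getElem _ _ (by simpa using h)]
  exact List.getElem_set_self (by simpa using h)

theorem getD_set_ne (L : List (List Int)) (i j : Nat) (v : List Int) (h : i ≠ j) :
    (L.set i v).getD j [] = L.getD j [] := by
  rcases Nat.lt_or_ge j L.length with hlt | hge
  · rw [List.getD_eq_getElem _ _ (by simpa using hlt), List.getElem_set_ne (by omega),
      ← List.getD_eq_getElem _ _ hlt]
  · rw [List.getD_eq_default _ _ (by simpa using hge), List.getD_eq_default _ _ hge]

theorem chunkLoop_eq (l : List Int) : ∀ (chunked : List (List Int)) (point p : Nat),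
    0 < p → chunked.length = p → point ≤ p →
    chunkLoop l chunked point p =
      (List.range p).map (fun j => chunked.getD j [] ++ dist p point l j) := by
  induction l with
  | nil =>
    intro chunked point p hp hlen hpt
    show chunked = _
    subst hlen
    calc chunked = (List.range chunked.length).map (fun j => chunked.getD j []) :=
          (getD_map_range chunked).symm
      _ = _ := by
          apply List.map_congr_left
          intro j _
          rw [dist_nil, List.append_nil]
  | cons x xs ih =>
    intro chunked point p hp hlen hpt
    show chunkLoop xs (chunked.set (if point ≥ p then 0 else point)
      (chunked.getD (if point ≥ p then 0 else point) [] ++ [x]))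
      ((if point ≥ p then 0 else point) + 1) p = _
    have hpp : (if point ≥ p then 0 else point) = point % p := by
      split_ifs with h
      · have hpe : point = p := by omega
        simp [hpe]
      · exact (Nat.mod_eq_of_lt (by omega)).symm
    rw [hpp]
    have hpt' : point % p < p := Nat.mod_lt _ hp
    rw [ih _ _ _ hp (by simp [hlen]) (by omega)]
    apply List.map_congr_left
    intro j hj
    have hjp : j < p := List.mem_range.mp hj
    rw [dist_cons]
    by_cases hje : point % p = j
    · rw [if_pos hje, ← hje]
      rw [getD_set_self _ _ _ (by omega), List.append_assoc]
    · rw [if_neg hje, getD_set_ne _ _ _ _ hje, List.nil_append]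

theorem mod_add_mod' (s c p : Nat) : (s % p + c) % p = (s + c) % p := by
  conv_lhs => rw [Nat.add_mod, Nat.mod_mod_of_dvd _ (dvd_refl p), ← Nat.add_mod]

theorem dist_mod' (p s : Nat) (l : List Int) (j : Nat) : dist p s l j = dist p (s % p) l j :=
  (dist_mod p s l j).symm

theorem dist_append (p : Nat) (a : List Int) : ∀ (s : Nat) (b : List Int) (j : Nat),
    dist p s (a ++ b) j = dist p s a j ++ dist p (s + a.length) b j := by
  induction a with
  | nil => intro s b j; simp [dist_nil]
  | cons x xs ih =>
    intro s b j
    rw [List.cons_append, dist_cons, dist_cons, ih, List.append_assoc]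
    congr 2
    rw [dist_mod' p (s % p + 1 + xs.length) b j, dist_mod' p (s + (x :: xs).length) b j]
    congr 1
    have e1 : s % p + 1 + xs.length = s % p + (1 + xs.length) := by omega
    rw [e1, mod_add_mod']
    congr 1
    simp only [List.length_cons]
    omega

theorem dist_block (p : Nat) (a : List Int) : ∀ (s j : Nat), s + a.length ≤ p →
    dist p s a j = if s ≤ j ∧ j < s + a.length then [a.getD (j - s) 0] else [] := by
  induction a with
  | nil =>
    intro s j hs
    rw [dist_nil, if_neg (by simp)]
  | cons x xs ih =>
    intro s j hs
    simp only [List.length_cons] at hs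
    have hsp : s % p = s := Nat.mod_eq_of_lt (by omega)
    rw [dist_cons, hsp, ih (s + 1) j (by omega)]
    by_cases hsj : s = j
    · subst hsj
      rw [if_pos rfl, if_neg (by omega), if_pos (by simp only [List.length_cons]; omega)]
      simp
    · rw [if_neg hsj]
      simp only [List.length_cons]
      by_cases hin : s + 1 ≤ j ∧ j < s + 1 + xs.length
      · rw [if_pos hin, if_pos (by omega)]
        have he : j - s = (j - (s + 1)) + 1 := by omega
        rw [List.nil_append, he, List.getD_cons_succ]
      · rw [if_neg hin, if_neg (by omega)]
        simp

theorem dist_spec (p : Nat) (hp : 0 < p) : ∀ (k : Nat) (l : List Int), l.length = k * p →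
    ∀ j, j < p → (dist p 0 l j).length = k ∧
      ∀ t, t < k → (dist p 0 l j).getD t 0 = l.getD (t * p + j) 0 := by
  intro k
  induction k with
  | zero =>
    intro l hl j hj
    have hnil : l = [] := List.eq_nil_of_length_eq_zero (by omega)
    subst hnil
    exact ⟨by simp [dist_nil], fun t ht => by omega⟩
  | succ k ih =>
    intro l hl j hj
    have hexp : (k + 1) * p = k * p + p := by ring
    have hlp : p ≤ l.length := by omega
    have hta : (l.take p).length = p := by rw [List.length_take]; omega
    have htd : (l.drop p).length = k * p := by rw [List.length_drop]; omega
    have hdist : dist p 0 l j = (l.take p).getD j 0 :: dist p 0 (l.drop p) j := by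
      conv_lhs => rw [← List.take_append_drop p l]
      rw [dist_append, hta]
      have hblock : dist p 0 (l.take p) j = [(l.take p).getD j 0] := by
        rw [dist_block p _ 0 j (by omega), if_pos (by omega)]
        simp
      have hshift : dist p (0 + p) (l.drop p) j = dist p 0 (l.drop p) j := by
        rw [dist_mod' p (0 + p), Nat.zero_add, Nat.mod_self]
      rw [hblock, hshift, List.singleton_append]
    rw [hdist]
    obtain ⟨ihl, ihe⟩ := ih (l.drop p) htd j hj
    refine ⟨by simp [ihl], ?_⟩
    intro t ht
    cases t with
    | zero =>
      simp only [List.getD_cons_zero, Nat.zero_mul, Nat.zero_add]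
      rw [List.getD_eq_getElem _ _ (by omega), List.getElem_take,
        ← List.getD_eq_getElem _ _ (by omega)]
    | succ t =>
      rw [List.getD_cons_succ, ihe t (by omega)]
      have hidx : t * p + j < (l.drop p).length := by
        rw [htd]
        exact mul_add_lt t j k p (by omega) hj
      rw [List.getD_eq_getElem _ _ hidx, List.getElem_drop,
        ← List.getD_eq_getElem _ _ (by simp only [List.length_drop] at hidx; omega)]
      congr 1
      ring

-- flatten of equal-length lists, elementwise
theorem flatten_getElem? (m : Nat) (hm : 0 < m) : ∀ (L : List (List Int)),
    (∀ c ∈ L, c.length = m) → ∀ d, d < L.length * m →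
    L.flatten[d]? = (L.getD (d / m) [])[d % m]? := by
  intro L
  induction L with
  | nil => intro _ d hd; simp at hd
  | cons c L ih =>
    intro hall d hd
    have hc : c.length = m := hall c (by simp)
    rw [List.flatten_cons]
    by_cases hdm : d < m
    · rw [List.getElem?_append_left (by omega)]
      rw [Nat.div_eq_of_lt hdm, Nat.mod_eq_of_lt hdm]
      simp
    · rw [List.getElem?_append_right (by omega)]
      have he : d = (d - m) + m := by omega
      have hdiv : d / m = (d - m) / m + 1 := by
        conv_lhs => rw [he]
        rw [Nat.add_div_right _ hm]
      have hmod : d % m = (d - m) % m := by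
        conv_lhs => rw [he]
        rw [Nat.add_mod_right]
      rw [hdiv, hmod, List.getD_cons_succ, hc]
      have hd' : d < (L.length + 1) * m := by simpa using hd
      have hx : (L.length + 1) * m = L.length * m + m := by ring
      exact ih (fun x hx => hall x (by simp [hx])) (d - m) (by omega)

theorem flatten_length (m : Nat) : ∀ (L : List (List Int)),
    (∀ c ∈ L, c.length = m) → L.flatten.length = L.length * m := by
  intro L
  induction L with
  | nil => simp
  | cons c L ih =>
    intro hall
    simp only [List.flatten_cons, List.length_append, List.length_cons]
    rw [hall c (by simp), ih (fun x hx => hall x (by simp [hx]))]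
    ring

theorem foldl_append_eq_flatten' (f : List Int → List Int) (L : List (List Int))
    (acc : List Int) : L.foldl (fun ret c => ret ++ f c) acc = acc ++ (L.map f).flatten := by
  induction L generalizing acc with
  | nil => simp
  | cons c L ih => simp [List.foldl, ih]

-- the crux: B applied blockwise to A's chunks = B applied to the whole list
theorem crux (list : List Int) (hn : 2 ≤ list.length) :
    ((List.range list.length.minFac).map
        (fun j => solution_alt (dist list.length.minFac 0 list j))).flatten
      = solution_alt list := by
  obtain ⟨p, hpdef⟩ : ∃ p, list.length.minFac = p := ⟨_, rfl⟩
  obtain ⟨m, hmdef⟩ : ∃ m, list.length / p = m := ⟨_, rfl⟩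
  rw [hpdef]
  have hp2 : 2 ≤ p := hpdef ▸ (Nat.minFac_prime (by omega)).two_le
  have hpdvd : p ∣ list.length := hpdef ▸ Nat.minFac_dvd _
  have hmul : p * m = list.length := by
    rw [← hmdef]
    exact Nat.mul_div_cancel' hpdvd
  have hm1 : 1 ≤ m := by
    rcases Nat.eq_zero_or_pos m with h | h
    · rw [h, Nat.mul_zero] at hmul; omega
    · exact h
  have hklen : list.length = m * p := by rw [← hmul]; ring
  have hchunklen : ∀ j, j < p → (dist p 0 list j).length = m :=
    fun j hj => (dist_spec p (by omega) m list hklen j hj).1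
  have hchunkel : ∀ j, j < p → ∀ t, t < m →
      (dist p 0 list j).getD t 0 = list.getD (t * p + j) 0 :=
    fun j hj => (dist_spec p (by omega) m list hklen j hj).2
  have hall : ∀ c ∈ (List.range p).map (fun j => solution_alt (dist p 0 list j)),
      c.length = m := by
    intro c hc
    obtain ⟨j, hj, rfl⟩ := List.mem_map.1 hc
    rw [solution_alt_length, hchunklen j (List.mem_range.mp hj)]
  have hprod : (list.length.primeFactorsList).prod = list.length :=
    Nat.prod_primeFactorsList (by omega)
  have hpos : ∀ q ∈ list.length.primeFactorsList, 0 < q :=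
    fun q hq => Nat.pos_of_mem_primeFactorsList hq
  have hmprod : (m.primeFactorsList).prod = m := Nat.prod_primeFactorsList (by omega)
  have hmpos : ∀ q ∈ m.primeFactorsList, 0 < q :=
    fun q hq => Nat.pos_of_mem_primeFactorsList hq
  have hps : list.length.primeFactorsList = p :: m.primeFactorsList := by
    rw [← hpdef, ← hmdef, ← hpdef]
    exact pfl_cons _ hn
  apply List.ext_getElem?
  intro d
  rcases Nat.lt_or_ge d list.length with hd | hd
  · obtain ⟨i, hi, hdi⟩ := destF_surj list.length.primeFactorsList list.length d hprod hpos hd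
    rw [← hdi]
    rw [solution_alt_getElem? list hn i hi]
    have hsplitd : destF list.length.primeFactorsList list.length i
        = i % p * m + destF m.primeFactorsList m (i / p) := by
      rw [hps]
      show i % p * (list.length / p) + destF m.primeFactorsList (list.length / p) (i / p) = _
      rw [hmdef]
    have hjp : i % p < p := Nat.mod_lt _ (by omega)
    have htm : i / p < m := by
      rw [Nat.div_lt_iff_lt_mul (by omega : 0 < p)]
      omega
    have hr : destF m.primeFactorsList m (i / p) < m :=
      destF_lt _ _ _ hmprod hmpos htm
    have hdiv : (i % p * m + destF m.primeFactorsList m (i / p)) / m = i % p := by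
      rw [Nat.mul_comm (i % p) m, Nat.mul_add_div (by omega), Nat.div_eq_of_lt hr,
        Nat.add_zero]
    have hmod : (i % p * m + destF m.primeFactorsList m (i / p)) % m
        = destF m.primeFactorsList m (i / p) := by
      rw [Nat.mul_comm (i % p) m, Nat.mul_add_mod, Nat.mod_eq_of_lt hr]
    rw [hsplitd, flatten_getElem? m (by omega) _ hall _
      (by rw [List.length_map, List.length_range]
          exact mul_add_lt _ _ _ _ hjp hr),
      hdiv, hmod]
    have hgd : ((List.range p).map (fun j => solution_alt (dist p 0 list j))).getD (i % p) []
        = solution_alt (dist p 0 list (i % p)) := by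
      rw [List.getD_eq_getElem _ _ (by simpa using hjp)]
      simp
    rw [hgd]
    have him : p * (i / p) + i % p = i := Nat.div_add_mod i p
    rcases Nat.lt_or_ge m 2 with hm2 | hm2
    · -- m = 1: the chunk is a singleton; solution_alt is the identity on it
      have hm1' : m = 1 := by omega
      have ht0 : i / p = 0 := Nat.lt_one_iff.mp (hm1' ▸ htm)
      have hds : destF m.primeFactorsList m (i / p) = 0 := by
        rw [hm1']
        simp [Nat.primeFactorsList_one, destF]
      rw [hds, solution_alt_short _ (by rw [hchunklen _ hjp]; omega)]
      rw [List.getElem?_eq_getElem (by rw [hchunklen _ hjp]; omega)]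
      have hv := hchunkel (i % p) hjp 0 (by omega)
      rw [List.getD_eq_getElem _ _ (by rw [hchunklen _ hjp]; omega)] at hv
      have hidx : 0 * p + i % p = i := by
        rw [ht0, Nat.mul_zero] at him
        omega
      rw [hidx] at hv
      rw [hv]
    · -- m ≥ 2: apply the characterization of solution_alt to the chunk
      have hcl : (dist p 0 list (i % p)).length = m := hchunklen _ hjp
      have hch := solution_alt_getElem? (dist p 0 list (i % p)) (by rw [hcl]; omega)
        (i / p) (by rw [hcl]; exact htm)
      rw [hcl] at hch
      rw [hch, hchunkel (i % p) hjp (i / p) htm]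
      have hidx : i / p * p + i % p = i := by
        have hc2 : i / p * p = p * (i / p) := Nat.mul_comm _ _
        omega
      rw [hidx]
  · have hfl : ((List.range p).map (fun j => solution_alt (dist p 0 list j))).flatten.length
        = list.length := by
      rw [flatten_length m _ hall, List.length_map, List.length_range, ← hmul]
    rw [List.getElem?_eq_none (show _ ≤ d by rw [hfl]; omega),
      List.getElem?_eq_none (show _ ≤ d by rw [solution_alt_length]; omega)]

theorem main (n : Nat) : ∀ (fuel : Nat) (list : List Int), list.length = n → n ≤ fuel →
    solutionFuel fuel list = solution_alt list := by
  induction n using Nat.strong_induction_on with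
  | _ n ih =>
    intro fuel list hl hf
    match fuel with
    | 0 =>
      have hn0 : n = 0 := by omega
      subst hn0
      have hnil : list = [] := List.eq_nil_of_length_eq_zero hl
      subst hnil
      rw [solution_alt_short [] (by simp)]
      rfl
    | fuel + 1 =>
      subst hl
      show (if list.length = 1 then list
        else (chunkLoop list (List.replicate (findP list.length) []) 0
          (findP list.length)).foldl (fun ret c => ret ++ solutionFuel fuel c) [])
        = solution_alt list
      by_cases h1 : list.length = 1
      · rw [if_pos h1, solution_alt_short list (by omega)]
      · rw [if_neg h1]
        rcases Nat.lt_or_ge list.length 2 with hlt | hge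
        · have hnil : list = [] := List.eq_nil_of_length_eq_zero (by omega)
          subst hnil
          have h0 : findP 0 = 0 := by
            rw [findP, findPAux]
            simp
          simp only [List.length_nil]
          rw [h0, solution_alt_short [] (by simp)]
          rfl
        · have hp : findP list.length = list.length.minFac := findP_eq _ hge
          have hp2 : 2 ≤ list.length.minFac := (Nat.minFac_prime (by omega)).two_le
          rw [hp]
          have hchunk : chunkLoop list (List.replicate list.length.minFac []) 0
              list.length.minFac
              = (List.range list.length.minFac).map
                  (fun j => dist list.length.minFac 0 list j) := by
            rw [chunkLoop_eq list _ 0 _ (by omega) (by simp) (by omega)]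
            apply List.map_congr_left
            intro j hj
            have hrep : (List.replicate list.length.minFac ([]:List Int)).getD j [] = [] := by
              rcases Nat.lt_or_ge j list.length.minFac with h | h
              · rw [List.getD_eq_getElem _ _ (by simpa using h)]
                simp
              · rw [List.getD_eq_default _ _ (by simpa using h)]
            rw [hrep, List.nil_append]
          rw [hchunk, foldl_append_eq_flatten', List.nil_append, List.map_map]
          have hdvd : list.length.minFac ∣ list.length := Nat.minFac_dvd _
          have hmul : list.length.minFac * (list.length / list.length.minFac)
              = list.length := Nat.mul_div_cancel' hdvd
          have hmap : (List.range list.length.minFac).map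
              ((fun c => solutionFuel fuel c) ∘ (fun j => dist list.length.minFac 0 list j))
              = (List.range list.length.minFac).map
                  (fun j => solution_alt (dist list.length.minFac 0 list j)) := by
            apply List.map_congr_left
            intro j hj
            have hjP : j < list.length.minFac := List.mem_range.mp hj
            have hklen2 : list.length
                = list.length / list.length.minFac * list.length.minFac := by
              conv_lhs => rw [← hmul]
              rw [Nat.mul_comm]
            have hlen : (dist list.length.minFac 0 list j).length
                = list.length / list.length.minFac :=
              (dist_spec _ (by omega) _ list hklen2 j hjP).1
            have hsm : list.length / list.length.minFac < list.length :=
              Nat.div_lt_self (by omega) (by omega)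
            have hf2 : list.length / list.length.minFac ≤ fuel := by
              have h2 : list.length / list.length.minFac ≤ list.length / 2 :=
                Nat.div_le_div_left hp2 (by omega)
              have h3 : list.length / 2 < list.length := Nat.div_lt_self (by omega) (by omega)
              omega
            exact ih _ hsm fuel _ hlen hf2
          rw [hmap]
          exact crux list hge

-- ===== VERDICT (by name: the statement is the Claim_ definition above) =====
theorem solution_spec : Claim_equal_solution := by
  intro list _
  unfold Spec_solution solution
  exact main list.length list.length list rfl le_rfl
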